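-- pv_equiv track=rewrite | github.com/Dimitrov-S-Dev-Python/100_Days_of_Code | 3.Logical_Operators/Exercise_5.py | get_love
-- ===== SOURCE A (Python) =====
-- def get_love(name1, name2):
--     num1 = 0
--     num2 = 0
--     for char in name1.lower():
--         for char2 in "true":
--             if char == char2:
--                 num1 += 1
--
--     for char in name2.lower():
--         for char2 in "true":
--             if char == char2:
--                 num1 += 1
--
--     for char in name1.lower():
--         for char2 in "love":
--             if char == char2:
--                 num2 += 1
--     for char in name2.lower():
--         for char2 in "love":
--             if char == char2:
--                 num2 += 1
--
--     name_score = str(num1) + str(num2)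
--     name_score = int(name_score)
--     return name_score
-- ===== SOURCE B (Python) =====
-- def get_love(name1, name2):
--     freq = {}
--     for ch in (name1 + name2).lower():
--         freq[ch] = freq.get(ch, 0) + 1
--     num1 = freq.get('t', 0) + freq.get('r', 0) + freq.get('u', 0) + freq.get('e', 0)
--     num2 = freq.get('l', 0) + freq.get('o', 0) + freq.get('v', 0) + freq.get('e', 0)
--     return int(str(num1) + str(num2))
-- ===== Notes on version B (the rewrite author's own statement) =====
-- stated objective: faster
-- what changed: B builds a character-frequency dictionary of the lowered concatenation in one pass and then reads the eight target letters off it with O(1) lookups, removing A's inner per-character comparison loop over the pattern.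
import Mathlib
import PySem

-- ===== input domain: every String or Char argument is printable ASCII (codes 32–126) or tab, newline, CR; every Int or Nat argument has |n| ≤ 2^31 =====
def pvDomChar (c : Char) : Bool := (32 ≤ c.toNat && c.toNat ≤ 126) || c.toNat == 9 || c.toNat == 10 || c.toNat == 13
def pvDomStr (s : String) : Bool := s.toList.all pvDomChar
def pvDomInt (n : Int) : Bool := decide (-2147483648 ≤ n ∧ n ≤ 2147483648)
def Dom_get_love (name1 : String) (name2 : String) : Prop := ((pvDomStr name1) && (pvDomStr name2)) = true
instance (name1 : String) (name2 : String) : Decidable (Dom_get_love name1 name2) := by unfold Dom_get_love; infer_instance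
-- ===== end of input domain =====

-- B builds a one-pass character-frequency dictionary of the lowered concatenation and reads the eight target letters off it, replacing A's four pattern-scanning text loops; return value only.

-- ===== PORT A =====
-- nested loops 'for char in s.lower(): for char2 in pat: if char == char2: n += 1'
def pvNested (pat : List Char) (s : List Char) (acc : Int) : Int :=
  s.foldl (fun a c => pat.foldl (fun a2 c2 => if c == c2 then a2 + 1 else a2) a) acc

def get_love (name1 : String) (name2 : String) : Int :=
  let num1 := pvNested "true".toList (PySem.Chars.lower name1.toList) 0
  let num1 := pvNested "true".toList (PySem.Chars.lower name2.toList) num1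
  let num2 := pvNested "love".toList (PySem.Chars.lower name1.toList) 0
  let num2 := pvNested "love".toList (PySem.Chars.lower name2.toList) num2
  -- int(str(num1) + str(num2)) always succeeds (digit string); .getD 0 is unreachable
  (PySem.Int.ofChars? (PySem.Int.toChars num1 ++ PySem.Int.toChars num2)).getD 0

-- ===== PORT B =====
def get_love_alt (name1 : String) (name2 : String) : Int :=
  -- freq[ch] = freq.get(ch, 0) + 1 over the lowered concatenation
  let freq : PySem.Dict Char Int :=
    (PySem.Chars.lower (name1.toList ++ name2.toList)).foldl
      (fun d ch => d.insert ch (d.getD ch 0 + 1)) PySem.Dict.empty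
  let num1 := freq.getD 't' 0 + freq.getD 'r' 0 + freq.getD 'u' 0 + freq.getD 'e' 0
  let num2 := freq.getD 'l' 0 + freq.getD 'o' 0 + freq.getD 'v' 0 + freq.getD 'e' 0
  -- int(str(num1) + str(num2)) always succeeds (digit string); .getD 0 is unreachable
  (PySem.Int.ofChars? (PySem.Int.toChars num1 ++ PySem.Int.toChars num2)).getD 0

-- ===== PRECONDITION & SPEC =====
def Spec_get_love (name1 : String) (name2 : String) (out : Int) : Prop := out = get_love_alt name1 name2
instance (name1 : String) (name2 : String) (out : Int) : Decidable (Spec_get_love name1 name2 out) := by unfold Spec_get_love; infer_instance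

-- ===== CLAIM =====
def Claim_equal_get_love : Prop := ∀ (name1 : String) (name2 : String), Dom_get_love name1 name2 → Spec_get_love name1 name2 (get_love name1 name2)

-- ===== LEMMAS AND PROOFS =====

lemma pvSumIte (x : Char) (p : List Char) :
    ((p.map (fun i => if x = i then (1 : Int) else 0)).sum) = (p.count x : Int) := by
  induction p with
  | nil => simp
  | cons y q ih =>
    simp only [List.map_cons, List.sum_cons, List.count_cons, ih]
    by_cases h : x = y
    · simp [h]; ring
    · simp [h, Ne.symm h]

lemma pvSumCountCons (pat : List Char) (x : Char) (xs : List Char) :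
    ((pat.map (fun c => ((x :: xs).count c : Int))).sum)
      = (pat.count x : Int) + (pat.map (fun c => (xs.count c : Int))).sum := by
  induction pat with
  | nil => simp
  | cons y p ih =>
    simp only [List.map_cons, List.sum_cons, List.count_cons]
    by_cases h : x = y
    · subst h; simp [pvSumIte]; ring
    · simp [h, Ne.symm h, pvSumIte]; ring

-- the inner 'for char2 in pat' loop adds the count of c in pat
lemma pvInner (pat : List Char) (c : Char) (a : Int) :
    pat.foldl (fun a2 c2 => if c == c2 then a2 + 1 else a2) a = a + (pat.count c : Int) := by
  induction pat generalizing a with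
  | nil => simp
  | cons y p ih =>
    simp only [List.foldl_cons, List.count_cons, ih]
    by_cases h : c = y
    · simp [h]; ring
    · simp [h, Ne.symm h]

-- the nested loop equals init + Σ_{c ∈ pat} s.count c
lemma pvNested_eq (pat s : List Char) (acc : Int) :
    pvNested pat s acc = acc + (pat.map (fun c => (s.count c : Int))).sum := by
  induction s generalizing acc with
  | nil => simp [pvNested]
  | cons x xs ih =>
    simp only [pvNested, List.foldl_cons, pvInner] at *
    rw [ih, pvSumCountCons]; ring

lemma pvFreq_getD (s : List Char) (c : Char) :
    (s.foldl (fun d ch => d.insert ch (d.getD ch 0 + 1)) PySem.Dict.empty).getD c 0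
      = (s.count c : Int) := by
  rw [PySem.Dict.foldl_insert_getD_add_one_eq_counter, PySem.Dict.getD_counter]

lemma pvLowerAppend (l1 l2 : List Char) :
    PySem.Chars.lower (l1 ++ l2) = PySem.Chars.lower l1 ++ PySem.Chars.lower l2 := by
  simp [PySem.Chars.lower]

-- ===== VERDICT =====
theorem get_love_spec : Claim_equal_get_love := by
  intro name1 name2 _
  unfold Spec_get_love get_love get_love_alt
  have ht : "true".toList = ['t','r','u','e'] := rfl
  have hl : "love".toList = ['l','o','v','e'] := rfl
  simp only [pvNested_eq, pvFreq_getD, pvLowerAppend, List.count_append, ht, hl,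
    List.map_cons, List.map_nil, List.sum_cons, List.sum_nil]
  push_cast
  ring_nf
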